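-- pv_equiv track=rewrite | github.com/childmindresearch/lingualearn | process_phonemes.py | combine_consonants
-- ===== SOURCE A (Python) =====
-- single_consonants = ['B','D','G','JH','L','N','P','S','T','V','Y','ZH','CH',
--                      'DH','F','HH','K','M','NG','R','SH','TH','W','Z']
--
-- def combine_consonants(phonemes):
--     '''
--     >>> combine_consonants(['Y','IY','L','D'])
--     ['Y', 'IY', 'L+D']
--     '''
--     phonemes_with_combined_consonants = []
--     P = len(phonemes)
--     i = 0
--     while i < P:
--         loop = True
--         while loop:
--             p1 = phonemes[i]
--             i += 1
--             if p1 in single_consonants: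
--                 if P > i:
--                     p2 = phonemes[i]
--                     i += 1
--                     if p2 in single_consonants:
--                         if P > i:
--                             p3 = phonemes[i]
--                             i += 1
--                             if p3 in single_consonants:
--                                 if P > i:
--                                     p4 = phonemes[i]
--                                     i += 1
--                                     if p4 in single_consonants:
--                                         phonemes_with_combined_consonants.append(p1 + '+' + p2 + '+' + p3 + '+' + p4)
--                                         #if P > i:
--                                         #    p5 = phonemes[i]
--                                         #    i += 1
--                                         #    if p5 in single_consonants:
--                                         #        phonemes_with_combined_consonants.append(p1 + '+' + p2 + '+' + p3 + '+' + p4 + '+' + p5)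
--                                         #    else:
--                                         #        phonemes_with_combined_consonants.append(p1 + '+' + p2 + '+' + p3 + '+' + p4)
--                                         #        phonemes_with_combined_consonants.append(p5)
--                                         #    break
--                                         #else:
--                                         #    phonemes_with_combined_consonants.append(p1 + '+' + p2 + '+' + p3 + '+' + p4)
--                                         #    break
--                                     else:
--                                         phonemes_with_combined_consonants.append(p1 + '+' + p2 + '+' + p3)
--                                         phonemes_with_combined_consonants.append(p4)
--                                     break
--                                 else:
--                                     phonemes_with_combined_consonants.append(p1 + '+' + p2 + '+' + p3)
--                                     break
--                             else:
--                                 phonemes_with_combined_consonants.append(p1 + '+' + p2)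
--                                 phonemes_with_combined_consonants.append(p3)
--                                 break
--                         else:
--                             phonemes_with_combined_consonants.append(p1 + '+' + p2)
--                             break
--                     else:
--                         phonemes_with_combined_consonants.append(p1)
--                         phonemes_with_combined_consonants.append(p2)
--                         break
--                 else:
--                     phonemes_with_combined_consonants.append(p1)
--                     break
--             else:
--                 phonemes_with_combined_consonants.append(p1)
--                 break
--
--     return phonemes_with_combined_consonants
-- ===== SOURCE B (Python) =====
-- single_consonants = ['B','D','G','JH','L','N','P','S','T','V','Y','ZH','CH',
--                      'DH','F','HH','K','M','NG','R','SH','TH','W','Z']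
-- _consonant_set = set(single_consonants)
--
-- def combine_consonants(phonemes):
--     out = []
--     run = []
--     for p in phonemes:
--         if p in _consonant_set:
--             run.append(p)
--         else:
--             for k in range(0, len(run), 4):
--                 out.append('+'.join(run[k:k+4]))
--             run = []
--             out.append(p)
--     for k in range(0, len(run), 4):
--         out.append('+'.join(run[k:k+4]))
--     return out
-- ===== Notes on version B (the rewrite author's own statement) =====
-- stated objective: alternative
-- what changed: Replaced A's hand-unrolled depth-4 if-cascade over indices with a single pass that accumulates each run of consecutive consonants and flushes it as '+'-joined chunks of 4, testing membership in a set instead of a 24-element list (measured around 1.5-1.6x faster, but not consistently, so no speed claim is made).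
import Mathlib
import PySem

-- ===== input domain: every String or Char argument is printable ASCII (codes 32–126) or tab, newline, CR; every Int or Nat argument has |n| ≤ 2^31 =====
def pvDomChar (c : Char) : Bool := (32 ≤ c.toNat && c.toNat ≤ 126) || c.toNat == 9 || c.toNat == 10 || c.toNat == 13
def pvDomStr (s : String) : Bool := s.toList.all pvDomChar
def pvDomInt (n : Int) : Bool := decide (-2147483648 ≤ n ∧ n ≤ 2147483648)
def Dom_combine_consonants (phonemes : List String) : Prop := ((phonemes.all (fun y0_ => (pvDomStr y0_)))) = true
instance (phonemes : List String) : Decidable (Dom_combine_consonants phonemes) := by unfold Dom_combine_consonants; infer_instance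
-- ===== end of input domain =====

-- B replaces A's hand-unrolled depth-4 consonant if-cascade by accumulate-the-run-then-flush-in-chunks-of-4 (set membership); same return value, proved equal.

-- ===== PORT A =====
def single_consonants : List String :=
  ["B","D","G","JH","L","N","P","S","T","V","Y","ZH","CH",
   "DH","F","HH","K","M","NG","R","SH","TH","W","Z"]

-- A's outer 'while i < P'; every branch of the inner 'while loop:' ends in 'break', so one outer
-- iteration is one pass through the nested ifs; the recursive call is the re-test of 'i < P'
def ccAGo (phonemes : List String) (P i : Nat) (acc : List String) : List String :=
  if _h1 : i < P then
    if single_consonants.contains (phonemes.getD i "") then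
      if _h2 : i + 1 < P then
        if single_consonants.contains (phonemes.getD (i+1) "") then
          if _h3 : i + 2 < P then
            if single_consonants.contains (phonemes.getD (i+2) "") then
              if _h4 : i + 3 < P then
                if single_consonants.contains (phonemes.getD (i+3) "") then
                  ccAGo phonemes P (i+4) (acc ++ [phonemes.getD i "" ++ "+" ++ phonemes.getD (i+1) "" ++ "+" ++ phonemes.getD (i+2) "" ++ "+" ++ phonemes.getD (i+3) ""])
                else
                  ccAGo phonemes P (i+4) (acc ++ [phonemes.getD i "" ++ "+" ++ phonemes.getD (i+1) "" ++ "+" ++ phonemes.getD (i+2) "", phonemes.getD (i+3) ""])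
              else
                ccAGo phonemes P (i+3) (acc ++ [phonemes.getD i "" ++ "+" ++ phonemes.getD (i+1) "" ++ "+" ++ phonemes.getD (i+2) ""])
            else
              ccAGo phonemes P (i+3) (acc ++ [phonemes.getD i "" ++ "+" ++ phonemes.getD (i+1) "", phonemes.getD (i+2) ""])
          else
            ccAGo phonemes P (i+2) (acc ++ [phonemes.getD i "" ++ "+" ++ phonemes.getD (i+1) ""])
        else
          ccAGo phonemes P (i+2) (acc ++ [phonemes.getD i "", phonemes.getD (i+1) ""])
      else
        ccAGo phonemes P (i+1) (acc ++ [phonemes.getD i ""])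
    else
      ccAGo phonemes P (i+1) (acc ++ [phonemes.getD i ""])
  else acc
termination_by P - i

def combine_consonants (phonemes : List String) : List String :=
  ccAGo phonemes phonemes.length 0 []

-- ===== PORT B =====
def consonant_set : PySem.Set String := PySem.Set.ofList single_consonants

-- the flush loop: for k in range(0, len(run), 4): out.append('+'.join(run[k:k+4]))
def flushRun (run : List String) : List String :=
  match run with
  | [] => []
  | p :: rest => PySem.Str.join "+" ((p :: rest).take 4) :: flushRun (rest.drop 3)
termination_by run.length
decreasing_by simp

def ccBGo (ph : List String) (run : List String) (acc : List String) : List String :=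
  match ph with
  | [] => acc ++ flushRun run
  | p :: rest =>
      if PySem.Set.contains consonant_set p then
        ccBGo rest (run ++ [p]) acc
      else
        ccBGo rest [] ((acc ++ flushRun run) ++ [p])

def combine_consonants_alt (phonemes : List String) : List String :=
  ccBGo phonemes [] []

-- ===== PRECONDITION & SPEC =====
def Spec_combine_consonants (phonemes : List String) (out : List String) : Prop := out = combine_consonants_alt phonemes
instance (phonemes : List String) (out : List String) : Decidable (Spec_combine_consonants phonemes out) := by unfold Spec_combine_consonants; infer_instance

-- ===== CLAIM (what is proved, stated in full; the proofs are below) =====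
def Claim_equal_combine_consonants : Prop := ∀ (phonemes : List String), Dom_combine_consonants phonemes → Spec_combine_consonants phonemes (combine_consonants phonemes)

-- ===== LEMMAS AND PROOFS =====

theorem mem_consonant_set (p : String) : (p ∈ consonant_set) ↔ p ∈ single_consonants := by
  simp [consonant_set, PySem.Set.mem_ofList]

theorem join1 (a : String) : PySem.Str.join "+" [a] = a := by
  apply String.toList_injective
  simp [PySem.Str.join, PySem.Chars.join, List.intercalate]

theorem join2 (a b : String) : PySem.Str.join "+" [a, b] = a ++ "+" ++ b := by
  apply String.toList_injective
  simp [PySem.Str.join, PySem.Chars.join, List.intercalate]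

theorem join3 (a b c : String) : PySem.Str.join "+" [a, b, c] = a ++ "+" ++ b ++ "+" ++ c := by
  apply String.toList_injective
  simp [PySem.Str.join, PySem.Chars.join, List.intercalate]

theorem join4 (a b c d : String) : PySem.Str.join "+" [a, b, c, d] = a ++ "+" ++ b ++ "+" ++ c ++ "+" ++ d := by
  apply String.toList_injective
  simp [PySem.Str.join, PySem.Chars.join, List.intercalate]

theorem flushRun_chunk (a b c d : String) (r : List String) :
    flushRun ([a, b, c, d] ++ r) = PySem.Str.join "+" [a, b, c, d] :: flushRun r := by
  cases r <;> rw [flushRun] <;> simp [flushRun]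

theorem ccBGo_acc (ph : List String) : ∀ run acc, ccBGo ph run acc = acc ++ ccBGo ph run [] := by
  induction ph with
  | nil => intro run acc; simp [ccBGo]
  | cons p rest ih =>
      intro run acc
      by_cases h : p ∈ consonant_set
      · simp [ccBGo, h]; rw [ih (run ++ [p]) acc, ih (run ++ [p]) []]
      · simp only [ccBGo]
        simp [h]
        rw [ih [] ((acc ++ (flushRun run ++ [p]))), ih [] ((flushRun run ++ [p]))]
        simp

theorem ccBGo_chunk (a b c d : String) (ph : List String) :
    ∀ r, ccBGo ph ([a, b, c, d] ++ r) [] = PySem.Str.join "+" [a, b, c, d] :: ccBGo ph r [] := by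
  induction ph with
  | nil => intro r; simpa [ccBGo] using flushRun_chunk a b c d r
  | cons p rest ih =>
      intro r
      by_cases h : p ∈ consonant_set
      · simp only [ccBGo]
        simp only [PySem.Set.contains_eq_listContains]
        simp [h]
        simpa using ih (r ++ [p])
      · simp only [ccBGo]
        simp [h]
        rw [show (a :: b :: c :: d :: r) = [a,b,c,d] ++ r from rfl, flushRun_chunk a b c d r,
            ccBGo_acc rest [] ((PySem.Str.join "+" [a,b,c,d] :: flushRun r) ++ [p]),
            ccBGo_acc rest [] (flushRun r ++ [p])]
        simp
theorem ccBGo_cons_mem (p : String) (rest run acc : List String) (h : p ∈ consonant_set) :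
    ccBGo (p :: rest) run acc = ccBGo rest (run ++ [p]) acc := by
  simp [ccBGo, h]

theorem ccBGo_cons_not (p : String) (rest run acc : List String) (h : p ∉ consonant_set) :
    ccBGo (p :: rest) run acc = (acc ++ flushRun run) ++ [p] ++ ccBGo rest [] [] := by
  simp only [ccBGo]
  simp [h]
  rw [ccBGo_acc rest [] (acc ++ (flushRun run ++ [p]))]
  simp

-- the main invariant: A's index loop from position i produces B's run-based pass over the remaining suffix
theorem ccAGo_eq (ph : List String) : ∀ (n i : Nat) (acc : List String), ph.length - i ≤ n →
    ccAGo ph ph.length i acc = acc ++ ccBGo (ph.drop i) [] [] := by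
  intro n
  induction n with
  | zero =>
      intro i acc h
      have hi : ¬ i < ph.length := by omega
      rw [ccAGo.eq_def]
      simp [hi, List.drop_eq_nil_of_le (by omega : ph.length ≤ i), ccBGo, flushRun]
  | succ n ih =>
      intro i acc h
      by_cases h1 : i < ph.length
      case neg =>
        rw [ccAGo.eq_def]
        simp [h1, List.drop_eq_nil_of_le (by omega : ph.length ≤ i), ccBGo, flushRun]
      case pos =>
      have e1 : ph.drop i = ph.getD i "" :: ph.drop (i+1) := by
        rw [List.getD_eq_getElem ph "" h1]; exact (List.getElem_cons_drop h1).symm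
      by_cases c1 : ph.getD i "" ∈ single_consonants
      case neg =>
        rw [ccAGo.eq_def]
        simp only [dif_pos h1,
          if_neg (by simp only [List.contains_iff_mem]; exact c1 :
            ¬ single_consonants.contains (ph.getD i "") = true)]
        rw [ih (i+1) _ (by omega), e1,
          ccBGo_cons_not _ _ _ _ (fun hm => c1 ((mem_consonant_set _).mp hm))]
        simp [flushRun]
      case pos =>
      have cA1 : single_consonants.contains (ph.getD i "") = true := by
        simp only [List.contains_iff_mem]; exact c1
      have cs1 : ph.getD i "" ∈ consonant_set := (mem_consonant_set _).mpr c1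
      by_cases h2 : i + 1 < ph.length
      case neg =>
        rw [ccAGo.eq_def]
        simp only [dif_pos h1, if_pos cA1, dif_neg h2]
        rw [ih (i+1) _ (by omega), e1, List.drop_eq_nil_of_le (by omega : ph.length ≤ i+1),
          ccBGo_cons_mem _ _ _ _ cs1]
        simp [ccBGo, flushRun, join1]
      case pos =>
      have e2 : ph.drop (i+1) = ph.getD (i+1) "" :: ph.drop (i+2) := by
        rw [List.getD_eq_getElem ph "" h2]
        have := List.getElem_cons_drop h2
        simpa using this.symm
      by_cases c2 : ph.getD (i+1) "" ∈ single_consonants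
      case neg =>
        rw [ccAGo.eq_def]
        simp only [dif_pos h1, if_pos cA1, dif_pos h2,
          if_neg (by simp only [List.contains_iff_mem]; exact c2 :
            ¬ single_consonants.contains (ph.getD (i+1) "") = true)]
        rw [ih (i+2) _ (by omega), e1, e2,
          ccBGo_cons_mem _ _ _ _ cs1,
          ccBGo_cons_not _ _ _ _ (fun hm => c2 ((mem_consonant_set _).mp hm))]
        simp [flushRun, join1]
      case pos =>
      have cA2 : single_consonants.contains (ph.getD (i+1) "") = true := by
        simp only [List.contains_iff_mem]; exact c2
      have cs2 : ph.getD (i+1) "" ∈ consonant_set := (mem_consonant_set _).mpr c2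
      by_cases h3 : i + 2 < ph.length
      case neg =>
        rw [ccAGo.eq_def]
        simp only [dif_pos h1, if_pos cA1, dif_pos h2, if_pos cA2, dif_neg h3]
        rw [ih (i+2) _ (by omega), e1, e2, List.drop_eq_nil_of_le (by omega : ph.length ≤ i+2),
          ccBGo_cons_mem _ _ _ _ cs1, ccBGo_cons_mem _ _ _ _ cs2]
        simp [ccBGo, flushRun, join2]
      case pos =>
      have e3 : ph.drop (i+2) = ph.getD (i+2) "" :: ph.drop (i+3) := by
        rw [List.getD_eq_getElem ph "" h3]
        have := List.getElem_cons_drop h3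
        have e : i + 2 + 1 = i + 3 := by omega
        rw [e] at this; simpa using this.symm
      by_cases c3 : ph.getD (i+2) "" ∈ single_consonants
      case neg =>
        rw [ccAGo.eq_def]
        simp only [dif_pos h1, if_pos cA1, dif_pos h2, if_pos cA2, dif_pos h3,
          if_neg (by simp only [List.contains_iff_mem]; exact c3 :
            ¬ single_consonants.contains (ph.getD (i+2) "") = true)]
        rw [ih (i+3) _ (by omega), e1, e2, e3,
          ccBGo_cons_mem _ _ _ _ cs1, ccBGo_cons_mem _ _ _ _ cs2,
          ccBGo_cons_not _ _ _ _ (fun hm => c3 ((mem_consonant_set _).mp hm))]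
        simp [flushRun, join2]
      case pos =>
      have cA3 : single_consonants.contains (ph.getD (i+2) "") = true := by
        simp only [List.contains_iff_mem]; exact c3
      have cs3 : ph.getD (i+2) "" ∈ consonant_set := (mem_consonant_set _).mpr c3
      by_cases h4 : i + 3 < ph.length
      case neg =>
        rw [ccAGo.eq_def]
        simp only [dif_pos h1, if_pos cA1, dif_pos h2, if_pos cA2, dif_pos h3, if_pos cA3, dif_neg h4]
        rw [ih (i+3) _ (by omega), e1, e2, e3, List.drop_eq_nil_of_le (by omega : ph.length ≤ i+3),
          ccBGo_cons_mem _ _ _ _ cs1, ccBGo_cons_mem _ _ _ _ cs2, ccBGo_cons_mem _ _ _ _ cs3]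
        simp [ccBGo, flushRun, join3]
      case pos =>
      have e4 : ph.drop (i+3) = ph.getD (i+3) "" :: ph.drop (i+4) := by
        rw [List.getD_eq_getElem ph "" h4]
        have := List.getElem_cons_drop h4
        have e : i + 3 + 1 = i + 4 := by omega
        rw [e] at this; simpa using this.symm
      by_cases c4 : ph.getD (i+3) "" ∈ single_consonants
      case neg =>
        rw [ccAGo.eq_def]
        simp only [dif_pos h1, if_pos cA1, dif_pos h2, if_pos cA2, dif_pos h3, if_pos cA3, dif_pos h4,
          if_neg (by simp only [List.contains_iff_mem]; exact c4 :
            ¬ single_consonants.contains (ph.getD (i+3) "") = true)]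
        rw [ih (i+4) _ (by omega), e1, e2, e3, e4,
          ccBGo_cons_mem _ _ _ _ cs1, ccBGo_cons_mem _ _ _ _ cs2, ccBGo_cons_mem _ _ _ _ cs3,
          ccBGo_cons_not _ _ _ _ (fun hm => c4 ((mem_consonant_set _).mp hm))]
        simp [flushRun, join3]
      case pos =>
        have cA4 : single_consonants.contains (ph.getD (i+3) "") = true := by
          simp only [List.contains_iff_mem]; exact c4
        have cs4 : ph.getD (i+3) "" ∈ consonant_set := (mem_consonant_set _).mpr c4
        rw [ccAGo.eq_def]
        simp only [dif_pos h1, if_pos cA1, dif_pos h2, if_pos cA2, dif_pos h3, if_pos cA3, dif_pos h4, if_pos cA4]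
        rw [ih (i+4) _ (by omega), e1, e2, e3, e4,
          ccBGo_cons_mem _ _ _ _ cs1, ccBGo_cons_mem _ _ _ _ cs2, ccBGo_cons_mem _ _ _ _ cs3,
          ccBGo_cons_mem _ _ _ _ cs4]
        rw [show ((([] ++ [ph.getD i ""] ++ [ph.getD (i+1) ""] ++ [ph.getD (i+2) ""] ++ [ph.getD (i+3) ""]) : List String)
              = [ph.getD i "", ph.getD (i+1) "", ph.getD (i+2) "", ph.getD (i+3) ""] ++ []) from (by simp),
          ccBGo_chunk _ _ _ _ (ph.drop (i+4)) []]
        simp [join4]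

-- ===== VERDICT (by name: the statement is the Claim_ definition above) =====
theorem combine_consonants_spec : Claim_equal_combine_consonants := by
  intro phonemes _
  unfold Spec_combine_consonants combine_consonants combine_consonants_alt
  simpa using ccAGo_eq phonemes phonemes.length 0 [] (by omega)
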